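-- pv_equiv track=rewrite | github.com/Shay-M/Python-projects-and-exercises | Exercises/pythonNext/5/5.4.py | check_id_valid
-- ===== SOURCE A (Python) =====
-- def check_id_valid(id_number):
--     list_id_number = [int(x) for x in str(id_number)]  # convert id_number to list of integers
--     iter_list_id_number = iter(range(1, len(list_id_number)))  # need to decrease 1, starting from 0
--
--     for i in iter_list_id_number:
--         next(iter_list_id_number)  # skip even numbers
--         multiple = int(list_id_number[i]) * 2
--         list_id_number[i] = multiple
--
--         if int(multiple) > 9:
--             sum_of_digits = multiple % 10 + multiple // 10 % 10  # or use: (sum(divmod(multiple, 10)))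
--             list_id_number[i] = int(sum_of_digits)
--
--     return sum(list_id_number) % 10 == 0
-- ===== SOURCE B (Python) =====
-- def check_id_valid(id_number):
--     # Two-at-a-time structural recursion over the digit string with the
--     # closed-form reduction 2*d - 9 instead of A's in-place mutating indexed loop.
--     def weighted(ds):
--         if not ds:
--             return 0
--         if len(ds) == 1:
--             return int(ds[0])
--         double = 2 * int(ds[1])
--         return int(ds[0]) + (double if double <= 9 else double - 9) + weighted(ds[2:])
--     return weighted(str(id_number)) % 10 == 0
-- ===== Notes on version B (the rewrite author's own statement) =====
-- stated objective: simpler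
-- what changed: Replaces A's iterator-skip loop that mutates the digit list in place (doubling odd positions via explicit indexing and a mod/floordiv digit sum) with a pure two-digits-at-a-time structural recursion over the digit string using the closed-form reduce-by-nine doubling.
import Mathlib
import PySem

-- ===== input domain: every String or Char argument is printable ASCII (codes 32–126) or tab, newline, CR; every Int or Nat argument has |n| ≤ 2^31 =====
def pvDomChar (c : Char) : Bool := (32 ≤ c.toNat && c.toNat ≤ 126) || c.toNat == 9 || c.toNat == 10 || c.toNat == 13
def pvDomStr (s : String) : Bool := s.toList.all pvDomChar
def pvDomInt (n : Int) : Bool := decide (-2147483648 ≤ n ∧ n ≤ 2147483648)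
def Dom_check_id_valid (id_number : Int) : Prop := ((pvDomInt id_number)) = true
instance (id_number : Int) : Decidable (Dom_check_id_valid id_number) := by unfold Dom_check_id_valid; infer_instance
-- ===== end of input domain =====

-- B is simpler: a structural two-digits-at-a-time recursion over str(id_number) with the
-- closed-form reduction 2*d-9, instead of A's iterator-skip loop mutating the list in place.

-- int(x) for a single character x; exact for the digit characters '0'..'9'
-- (any other character is a ValueError in Python, excluded by Pre_check_id_valid).
def pvDigit (c : Char) : Int := (c.toNat : Int) - 48

-- ===== PORT A =====
-- one iteration of A's loop body at index i: multiple = l[i]*2; l[i] = multiple;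
-- if multiple > 9: l[i] = multiple % 10 + multiple // 10 % 10
def pvStepA (l : List Int) (i : Int) : List Int :=
  let multiple := PySem.List.pyGetD l i 0 * 2
  let l1 := PySem.List.pySetD l i multiple
  if multiple > 9 then
    PySem.List.pySetD l1 i (PySem.Int.mod multiple 10 +
      PySem.Int.mod (PySem.Int.floordiv multiple 10) 10)
  else l1

-- A's 'for i in iter(range(1, len)):' with a next() in the body visits i = 1, 3, 5, …,
-- ported as range(1, len, 2).  When len is even the final next() raises StopIteration
-- (those inputs are outside Pre_check_id_valid, as is the ValueError on negative input).
def check_id_valid (id_number : Int) : Bool :=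
  let list_id_number : List Int := (PySem.Int.toChars id_number).map pvDigit
  let final := (PySem.List.pyRange 1 (PySem.List.len list_id_number) 2).foldl
    pvStepA list_id_number
  decide (PySem.Int.mod final.sum 10 = 0)

-- ===== PORT B =====
-- weighted(ds): 0 for '', int(d) for a single digit, else
-- int(ds[0]) + (2*int(ds[1]) reduced by 9 when > 9) + weighted(ds[2:])
def pvWeighted : List Char → Int
  | [] => 0
  | [c] => pvDigit c
  | a :: b :: rest =>
      let double := 2 * pvDigit b
      pvDigit a + (if double ≤ 9 then double else double - 9) + pvWeighted rest

def check_id_valid_alt (id_number : Int) : Bool :=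
  decide (PySem.Int.mod (pvWeighted (PySem.Int.toChars id_number)) 10 = 0)

-- ===== PRECONDITION & SPEC =====
-- Exactly the inputs on which Python A returns: a nonnegative id_number (a negative
-- sign is a ValueError in int('-')) with an odd number of decimal digits (on an even
-- digit count the loop's final next() raises StopIteration).
def Pre_check_id_valid (id_number : Int) : Prop :=
  0 ≤ id_number ∧ (PySem.Int.toChars id_number).length % 2 = 1
instance (id_number : Int) : Decidable (Pre_check_id_valid id_number) := by
  unfold Pre_check_id_valid; infer_instance

def pvWitness_check_id_valid : Int := 123456782

def Spec_check_id_valid (id_number : Int) (out : Bool) : Prop := out = check_id_valid_alt id_number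
instance (id_number : Int) (out : Bool) : Decidable (Spec_check_id_valid id_number out) := by unfold Spec_check_id_valid; infer_instance

-- ===== CLAIM (what is proved, stated in full; the proofs are below) =====
def Claim_equal_check_id_valid : Prop := ∀ (id_number : Int), Dom_check_id_valid id_number → Pre_check_id_valid id_number → Spec_check_id_valid id_number (check_id_valid id_number)

-- ===== LEMMAS AND PROOFS =====

-- A's per-digit update as a function of the digit at an odd position
def pvGA (d : Int) : Int :=
  if d * 2 > 9 then PySem.Int.mod (d * 2) 10 + PySem.Int.mod (PySem.Int.floordiv (d * 2) 10) 10
  else d * 2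

-- the list A's loop produces: every second entry (positions 1, 3, …) replaced by pvGA
def pvGOdd : List Int → List Int
  | [] => []
  | [a] => [a]
  | a :: b :: rest => a :: pvGA b :: pvGOdd rest

lemma pvRange2_cons (a b : Int) (h : a < b) :
    PySem.List.pyRange a b 2 = a :: PySem.List.pyRange (a + 2) b 2 := by
  rw [PySem.List.pyRange_of_pos a b (by norm_num), PySem.List.pyRange_of_pos (a+2) b (by norm_num)]
  have hc : ((b - a + 2 - 1) / 2).toNat = (if a + 2 < b then ((b - (a+2) + 2 - 1) / 2).toNat else 0) + 1 := by
    split_ifs with h2 <;> omega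
  rw [if_pos h, hc, List.range_succ_eq_map]
  simp [List.map_map, Function.comp_def]
  intro k _
  ring

lemma pvStepA_mid (pre rest : List Int) (a b : Int) :
    pvStepA (pre ++ a :: b :: rest) ((pre.length : Int) + 1) = pre ++ a :: pvGA b :: rest := by
  have h1 : ((pre.length : Int) + 1) = (((pre.length + 1 : Nat)) : Int) := by push_cast; ring
  have hget : (pre ++ a :: b :: rest).getD (pre.length + 1) 0 = b := by
    simp [List.getD]
  have hset : ∀ v : Int, (pre ++ a :: b :: rest).set (pre.length + 1) v = pre ++ a :: v :: rest := by
    intro v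
    rw [List.set_append_right _ _ (by omega)]
    simp
  simp only [pvStepA, pvGA, h1, PySem.List.pyGetD_natCast, PySem.List.pySetD_natCast, hget, hset]
  split_ifs with h9
  · rw [List.set_append_right _ _ (by omega)]
    simp
  · rfl

-- A's fold over range(p+1, p+|l|, 2) acting on pre ++ l rewrites l's odd positions
lemma pvFoldA_spec : ∀ (l pre : List Int),
    (PySem.List.pyRange ((pre.length : Int) + 1) ((pre.length : Int) + l.length) 2).foldl
      pvStepA (pre ++ l) = pre ++ pvGOdd l := by
  intro l
  induction l using pvGOdd.induct with
  | case1 => intro pre; simp [pvGOdd, PySem.List.pyRange]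
  | case2 a => intro pre; simp [pvGOdd, PySem.List.pyRange]
  | case3 a b rest ih =>
    intro pre
    rw [pvRange2_cons _ _ (by simp)]
    rw [List.foldl_cons, pvStepA_mid]
    have h2 : pre ++ a :: pvGA b :: rest = (pre ++ [a, pvGA b]) ++ rest := by simp
    have h3 : (pre.length : Int) + 1 + 2 = ((pre ++ [a, pvGA b]).length : Int) + 1 := by
      simp; ring
    have h4 : (pre.length : Int) + ((a :: b :: rest).length : Int)
        = ((pre ++ [a, pvGA b]).length : Int) + (rest.length : Int) := by
      simp; ring
    rw [h2, h3, h4, ih]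
    simp [pvGOdd]

def pvIsDig (c : Char) : Prop := 48 ≤ c.toNat ∧ c.toNat ≤ 57

-- on a digit, A's mod/floordiv digit sum is B's closed-form 2*d - 9 reduction
lemma pvGA_digit (d : Int) (h0 : 0 ≤ d) (h9 : d ≤ 9) :
    pvGA d = if 2 * d ≤ 9 then 2 * d else 2 * d - 9 := by
  interval_cases d <;> decide

lemma pvWeighted_eq_sum : ∀ (cs : List Char), (∀ c ∈ cs, pvIsDig c) →
    pvWeighted cs = (pvGOdd (cs.map pvDigit)).sum := by
  intro cs
  induction cs using pvWeighted.induct with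
  | case1 => intro _; simp [pvWeighted, pvGOdd]
  | case2 c => intro _; simp [pvWeighted, pvGOdd]
  | case3 a b rest ih =>
    intro h
    have hb : pvIsDig b := h b (by simp)
    have hga : pvGA (pvDigit b) = if 2 * pvDigit b ≤ 9 then 2 * pvDigit b else 2 * pvDigit b - 9 := by
      apply pvGA_digit <;> (unfold pvIsDig at hb; unfold pvDigit; omega)
    simp only [pvWeighted, pvGOdd, List.map_cons, List.sum_cons, hga,
      ih (fun c hc => h c (by simp [hc]))]
    ring

lemma pvDigitChar_isDig (m : Nat) (h : m < 10) : pvIsDig (Nat.digitChar m) := by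
  interval_cases m <;> constructor <;> decide

lemma pvToDigitsCore_digits : ∀ (f n : Nat) (acc : List Char), (∀ c ∈ acc, pvIsDig c) →
    ∀ c ∈ Nat.toDigitsCore 10 f n acc, pvIsDig c := by
  intro f
  induction f with
  | zero => intro n acc hacc; simpa [Nat.toDigitsCore] using hacc
  | succ f ih =>
    intro n acc hacc c hc
    rw [Nat.toDigitsCore] at hc
    by_cases h0 : n / 10 = 0
    · rw [if_pos h0] at hc
      rcases List.mem_cons.mp hc with hc | hc
      · exact hc ▸ pvDigitChar_isDig _ (Nat.mod_lt _ (by norm_num))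
      · exact hacc _ hc
    · rw [if_neg h0] at hc
      refine ih _ _ ?_ _ hc
      intro c' hc'
      rcases List.mem_cons.mp hc' with hc' | hc'
      · exact hc' ▸ pvDigitChar_isDig _ (Nat.mod_lt _ (by norm_num))
      · exact hacc _ hc'

-- every character of str(n) for n ≥ 0 is a decimal digit
lemma pvToChars_digits (n : Int) (hn : 0 ≤ n) : ∀ c ∈ PySem.Int.toChars n, pvIsDig c := by
  unfold PySem.Int.toChars
  rw [if_neg (by omega)]
  unfold Nat.toDigits
  exact pvToDigitsCore_digits _ _ _ (fun c hc => absurd hc (List.not_mem_nil))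

-- ===== VERDICT (by name: the statement is the Claim_ definition above) =====
theorem check_id_valid_spec : Claim_equal_check_id_valid := by
  intro n _ hPre
  have h := pvFoldA_spec ((PySem.Int.toChars n).map pvDigit) []
  simp only [List.length_nil, Nat.cast_zero, zero_add, List.nil_append, List.length_map] at h
  simp only [Spec_check_id_valid, check_id_valid, check_id_valid_alt,
    PySem.List.len_eq, List.length_map, h,
    pvWeighted_eq_sum (PySem.Int.toChars n) (pvToChars_digits n hPre.1)]
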